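-- pv_equiv track=rewrite | github.com/raybuhr/adventofcode | day9/day9.py | remove_cancel
-- ===== SOURCE A (Python) =====
-- def remove_cancel(text):
--     garbage_idx = []
--     for idx, val in enumerate(text):
--         if val == "!":
--             garbage_idx.append(idx)
--             garbage_idx.append(idx+1)
--     keep_ids = [x for x in range(len(text)) if x not in garbage_idx]
--     keep_vals = [text[x] for x in keep_ids]
--     new_data = ''.join(keep_vals)
--     return new_data
-- ===== SOURCE B (Python) =====
-- def remove_cancel(text):
--     out = []
--     prev = ''
--     for c in text:
--         if c != '!' and prev != '!':
--             out.append(c)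
--         prev = c
--     return ''.join(out)
-- ===== Notes on version B (the rewrite author's own statement) =====
-- stated objective: faster
-- what changed: A builds a list of garbage indices, then filters the whole index range with a linear membership scan over that list (quadratic), then re-indexes the string; B is a single left-to-right pass that keeps a character iff neither it nor the previous character is a bang. Intended as faster (O(n) vs O(n^2)); a timing run measured about 1.6x at the largest size.
import Mathlib
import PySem

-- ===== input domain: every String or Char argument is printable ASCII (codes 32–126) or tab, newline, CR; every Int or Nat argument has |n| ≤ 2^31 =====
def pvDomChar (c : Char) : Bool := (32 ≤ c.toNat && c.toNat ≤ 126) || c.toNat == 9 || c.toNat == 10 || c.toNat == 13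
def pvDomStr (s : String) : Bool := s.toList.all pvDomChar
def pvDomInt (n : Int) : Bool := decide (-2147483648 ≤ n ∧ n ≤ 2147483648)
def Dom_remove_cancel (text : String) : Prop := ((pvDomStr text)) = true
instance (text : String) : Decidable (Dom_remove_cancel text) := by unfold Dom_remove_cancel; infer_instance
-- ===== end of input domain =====

-- B replaces A's three passes (garbage-index list, a quadratic 'x not in garbage_idx' filter, re-indexing)
-- by a single pass tracking only the previous character; return values are proved equal on all inputs.

-- ===== PORT A =====
def remove_cancel (text : String) : String :=
  let l := text.toList
  let garbage_idx := (PySem.List.enumerate l).foldl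
    (fun g p => if p.2 == '!' then g ++ [p.1, p.1 + 1] else g) ([] : List Int)
  let keep_ids := (PySem.List.pyRange 0 (l.length : Int) 1).filter (fun x => !(garbage_idx.contains x))
  -- every x ∈ keep_ids satisfies 0 ≤ x < len, so pyGetD is exact for Python's text[x]
  let keep_vals := keep_ids.map (fun x => PySem.List.pyGetD l x ' ')
  String.mk keep_vals

-- ===== PORT B =====
-- state: (output chars so far, previous char; none models Python's initial prev = '')
def remove_cancel_alt (text : String) : String :=
  let r := text.toList.foldl
    (fun (st : List Char × Option Char) c =>
      (if c != '!' && st.2 != some '!' then st.1 ++ [c] else st.1, some c))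
    (([] : List Char), (none : Option Char))
  String.mk r.1

-- ===== PRECONDITION & SPEC =====
def Spec_remove_cancel (text : String) (out : String) : Prop := out = remove_cancel_alt text
instance (text : String) (out : String) : Decidable (Spec_remove_cancel text out) := by unfold Spec_remove_cancel; infer_instance

-- ===== CLAIM (what is proved, stated in full; the proofs are below) =====
def Claim_equal_remove_cancel : Prop := ∀ (text : String), Dom_remove_cancel text → Spec_remove_cancel text (remove_cancel text)

-- ===== LEMMAS AND PROOFS =====

-- keep predicate: a position survives iff neither it nor its predecessor holds '!'
def keepCh (l : List Char) (x : Nat) : Bool :=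
  !(l.getD x ' ' == '!') && (decide (x = 0) || !(l.getD (x - 1) ' ' == '!'))

def canonRC (l : List Char) : List Char :=
  ((List.range l.length).filter (keepCh l)).map (fun x => l.getD x ' ')

def garbRC (l : List Char) : List Int :=
  (PySem.List.enumerate l).foldl
    (fun g p => if p.2 == '!' then g ++ [p.1, p.1 + 1] else g) ([] : List Int)

theorem getD_bang (l : List Char) (x : Nat) (hx : x < l.length) :
    l.getD x ' ' = '!' ↔ l[x]? = some '!' := by
  rw [List.getD_eq_getElem?_getD, List.getElem?_eq_getElem hx]
  simp

theorem mem_garb (l : List Char) (x : Int) :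
    x ∈ garbRC l
    ↔ ∃ (k : Nat), l[k]? = some '!' ∧ (x = k ∨ x = (k : Int) + 1) := by
  unfold garbRC
  rw [show (fun (g : List Int) (p : Int × Char) => if p.2 == '!' then g ++ [p.1, p.1 + 1] else g)
        = (fun g p => g ++ (if p.2 == '!' then [p.1, p.1 + 1] else [])) from by
      funext g p; split <;> simp]
  rw [PySem.List.foldl_append_eq_flatMap]
  simp only [List.nil_append, List.mem_flatMap, PySem.List.mem_enumerate_iff]
  constructor
  · rintro ⟨p, ⟨k, hk, rfl⟩, hx⟩
    simp only [zero_add] at hx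
    by_cases hb : l[k] = '!'
    · simp only [hb, beq_self_eq_true, if_true, List.mem_cons, List.not_mem_nil] at hx
      exact ⟨k, by rw [List.getElem?_eq_getElem hk, hb], by tauto⟩
    · simp [hb] at hx
  · rintro ⟨k, hb, hx⟩
    have hk : k < l.length := by
      by_contra hc
      simp [List.getElem?_eq_none (show l.length ≤ k by omega)] at hb
    have hbk : l[k] = '!' := by
      rw [List.getElem?_eq_getElem hk] at hb
      exact Option.some.inj hb
    refine ⟨((k : Int), l[k]), ⟨k, hk, by simp⟩, ?_⟩
    simp only [zero_add, hbk, beq_self_eq_true, if_true, List.mem_cons, List.not_mem_nil]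
    tauto

theorem garb_iff (l : List Char) (x : Nat) (hx : x < l.length) :
    (x : Int) ∈ garbRC l ↔ (l.getD x ' ' = '!' ∨ (x ≠ 0 ∧ l.getD (x - 1) ' ' = '!')) := by
  rw [mem_garb]
  constructor
  · rintro ⟨k, hb, hxk | hxk⟩
    · have hek : x = k := by omega
      subst hek
      exact Or.inl ((getD_bang l x hx).mpr hb)
    · have hx1 : x = k + 1 := by omega
      refine Or.inr ⟨by omega, ?_⟩
      rw [getD_bang l (x - 1) (by omega), show x - 1 = k from by omega]
      exact hb
  · rintro (hb | ⟨h0, hb⟩)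
    · exact ⟨x, (getD_bang l x hx).mp hb, Or.inl rfl⟩
    · exact ⟨x - 1, (getD_bang l (x - 1) (by omega)).mp hb, Or.inr (by omega)⟩

theorem keepCh_false_iff (l : List Char) (x : Nat) :
    keepCh l x = false ↔ (l.getD x ' ' = '!' ∨ (x ≠ 0 ∧ l.getD (x - 1) ' ' = '!')) := by
  simp only [keepCh, List.getD_eq_getElem?_getD]
  by_cases h1 : l[x]?.getD ' ' = '!' <;> by_cases h2 : x = 0 <;>
    by_cases h3 : l[x - 1]?.getD ' ' = '!' <;> simp [h1, h2, h3]

theorem contains_garb (l : List Char) (x : Nat) (hx : x < l.length) :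
    (garbRC l).contains (x : Int) = !(keepCh l x) := by
  cases hkc : keepCh l x with
  | false =>
    have hm : (x : Int) ∈ garbRC l := (garb_iff l x hx).mpr ((keepCh_false_iff l x).mp hkc)
    simp [List.contains_eq_mem, hm]
  | true =>
    have hm : (x : Int) ∉ garbRC l := fun hmem => by
      have : keepCh l x = false := (keepCh_false_iff l x).mpr ((garb_iff l x hx).mp hmem)
      rw [hkc] at this
      exact Bool.noConfusion this
    simp [List.contains_eq_mem, hm]

theorem A_canon (text : String) : remove_cancel text = String.mk (canonRC text.toList) := by
  show String.mk (((PySem.List.pyRange 0 ((text.toList.length : Int)) 1).filter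
        (fun x => !((garbRC text.toList).contains x))).map
        (fun x => PySem.List.pyGetD text.toList x ' '))
      = String.mk (canonRC text.toList)
  set l := text.toList with hl
  unfold canonRC
  congr 1
  rw [PySem.List.pyRange_zero_natCast, List.filter_map, List.map_map]
  have hfc : ∀ x ∈ List.range l.length,
      ((fun x => !((garbRC l).contains x)) ∘ fun (k : Nat) => (k : Int)) x = keepCh l x := by
    intro x hxm
    have hx : x < l.length := List.mem_range.mp hxm
    simp only [Function.comp_apply]
    rw [contains_garb l x hx, Bool.not_not]
  rw [List.filter_congr hfc]
  apply List.map_congr_left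
  intro x hxm
  simp [PySem.List.pyGetD_natCast]

theorem canon_append (l : List Char) (c : Char) :
    canonRC (l ++ [c]) = canonRC l ++ (if c != '!' && l.getLast? != some '!' then [c] else []) := by
  unfold canonRC
  have hlen : (l ++ [c]).length = l.length + 1 := by simp
  rw [hlen, List.range_succ, List.filter_append, List.map_append]
  have hgdpre : ∀ x, x < l.length → (l ++ [c]).getD x ' ' = l.getD x ' ' := by
    intro x hx
    simp [List.getD_eq_getElem?_getD, List.getElem?_append_left hx]
  have hgdn : (l ++ [c]).getD l.length ' ' = c := by
    simp [List.getD_eq_getElem?_getD]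
  congr 1
  · -- prefix part unchanged
    have hfc : ∀ x ∈ List.range l.length, keepCh (l ++ [c]) x = keepCh l x := by
      intro x hxm
      have hx : x < l.length := List.mem_range.mp hxm
      unfold keepCh
      rw [hgdpre x hx]
      by_cases h0 : x = 0
      · simp [h0]
      · rw [hgdpre (x - 1) (by omega)]
    rw [List.filter_congr hfc]
    apply List.map_congr_left
    intro x hxm
    exact hgdpre x (List.mem_range.mp (List.mem_of_mem_filter hxm))
  · -- the new last position
    have hcond : keepCh (l ++ [c]) l.length = (c != '!' && l.getLast? != some '!') := by
      cases hl0 : l with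
      | nil =>
        subst hl0
        by_cases hc : c = '!' <;> simp [keepCh, hc, bne]
      | cons a t =>
        have hne : l ≠ [] := by simp [hl0]
        rw [← hl0]
        have hpos : l.length ≠ 0 := by simp [hl0]
        have hgl : (l ++ [c]).getD (l.length - 1) ' ' = l.getLast hne := by
          rw [hgdpre (l.length - 1) (by omega), List.getD_eq_getElem?_getD,
            List.getElem?_eq_getElem (by omega)]
          simp [List.getLast_eq_getElem hne]
        have hkv : keepCh (l ++ [c]) l.length = (!(c == '!') && !(l.getLast hne == '!')) := by
          unfold keepCh
          rw [hgdn, hgl]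
          simp [hpos]
        rw [hkv, List.getLast?_eq_some_getLast hne]
        by_cases hc : c = '!' <;> by_cases hb : l.getLast hne = '!' <;> simp [hc, hb, bne]
    have hfilter : List.filter (keepCh (l ++ [c])) [l.length]
        = if c != '!' && l.getLast? != some '!' then [l.length] else [] := by
      cases hb : (c != '!' && l.getLast? != some '!') <;>
        simp [List.filter_singleton, hcond, hb]
    rw [hfilter]
    cases hb : (c != '!' && l.getLast? != some '!') <;> simp [hb, hgdn]

theorem B_canon (l : List Char) :
    l.foldl (fun (st : List Char × Option Char) c =>
      (if c != '!' && st.2 != some '!' then st.1 ++ [c] else st.1, some c))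
      (([] : List Char), (none : Option Char))
    = (canonRC l, l.getLast?) := by
  induction l using List.reverseRecOn with
  | nil => simp [canonRC]
  | append_singleton l c ih =>
    rw [List.foldl_append, ih]
    simp only [List.foldl_cons, List.foldl_nil, List.getLast?_concat]
    rw [canon_append]
    cases hb : (c != '!' && l.getLast? != some '!') <;> simp [hb]

-- ===== VERDICT (by name: the statement is the Claim_ definition above) =====
theorem remove_cancel_spec : Claim_equal_remove_cancel := by
  intro text _
  unfold Spec_remove_cancel remove_cancel_alt
  rw [A_canon, B_canon]
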